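-- pv_equiv track=rewrite | github.com/soohyuckcho96/kc-research-task | function.py | multi_word_keyword
-- ===== SOURCE A (Python) =====
-- def multi_word_keyword(potential_keywords, filtered_tokens):
--     relation = [t for t in filtered_tokens if t[1] in potential_keywords]
--     keywords = []
--     i = 0
--     while i < len(relation):
--         idx = relation[i][0]
--         keyword = relation[i][1]
--         j = i + 1
--         while j < len(relation):
--             next_idx = relation[j][0]
--             if next_idx != idx + 1:
--                 break
--             else:
--                 keyword += ' ' + relation[j][1]
--                 idx = next_idx
--                 j += 1
--         i = j
--         if keyword not in keywords:
--             keywords.append(keyword)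
--     return keywords
-- ===== SOURCE B (Python) =====
-- def multi_word_keyword(potential_keywords, filtered_tokens):
--     kws = set(potential_keywords)
--     relation = [t for t in filtered_tokens if t[1] in kws]
--     if not relation:
--         return []
--     cuts = ([0]
--             + [p + 1 for p, (a, b) in enumerate(zip(relation, relation[1:]))
--                if b[0] != a[0] + 1]
--             + [len(relation)])
--     phrases = [' '.join(w for _, w in relation[lo:hi])
--                for lo, hi in zip(cuts, cuts[1:])]
--     return list(dict.fromkeys(phrases))
-- ===== Notes on version B (the rewrite author's own statement) =====
-- stated objective: faster
-- what changed: Replaces A's stateful nested while-pointer scan (which grows each keyword in place and dedups by list membership inside the loop) with staged passes: filter the tokens, compute all run-boundary cut positions at once from adjacent index pairs, slice the relation at the cuts, join each slice, and dedup once at the end via dict.fromkeys with a set for keyword membership.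
import Mathlib
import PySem

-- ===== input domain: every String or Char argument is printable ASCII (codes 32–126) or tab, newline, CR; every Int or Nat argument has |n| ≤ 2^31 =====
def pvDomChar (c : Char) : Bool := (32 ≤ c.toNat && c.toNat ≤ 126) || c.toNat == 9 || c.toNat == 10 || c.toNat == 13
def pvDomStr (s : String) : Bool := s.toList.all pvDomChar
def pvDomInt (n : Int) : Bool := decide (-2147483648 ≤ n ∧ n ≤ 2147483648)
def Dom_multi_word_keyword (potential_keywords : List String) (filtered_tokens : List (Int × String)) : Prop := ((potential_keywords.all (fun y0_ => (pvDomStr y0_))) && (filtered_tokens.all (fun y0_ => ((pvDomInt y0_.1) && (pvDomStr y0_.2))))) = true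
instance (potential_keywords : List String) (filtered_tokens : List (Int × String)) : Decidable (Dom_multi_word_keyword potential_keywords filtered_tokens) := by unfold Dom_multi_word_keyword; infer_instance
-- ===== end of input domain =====

-- B replaces A's stateful two-pointer run scan and in-loop list dedup by staged passes:
-- it computes all run-boundary cut positions at once from adjacent pairs, slices the
-- filtered relation at the cuts, joins each slice, and dedups once at the end.

-- ===== PORT A =====
-- inner while loop: extends the current keyword while the next index is adjacent
def pvInnerA (idx : Int) (keyword : String) : List (Int × String) → String × List (Int × String)
  | [] => (keyword, [])
  | (nidx, w) :: rest =>
    if nidx ≠ idx + 1 then (keyword, (nidx, w) :: rest)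
    else pvInnerA nidx (keyword ++ " " ++ w) rest

-- the inner loop only consumes elements (needed for termination of the outer loop)
theorem pvInnerA_len (idx : Int) (keyword : String) (rel : List (Int × String)) :
    (pvInnerA idx keyword rel).2.length ≤ rel.length := by
  induction rel generalizing idx keyword with
  | nil => simp [pvInnerA]
  | cons h t ih =>
    obtain ⟨nidx, w⟩ := h
    by_cases hne : nidx ≠ idx + 1
    · simp [pvInnerA, hne]
    · simp only [pvInnerA, if_neg hne, List.length_cons]
      exact le_trans (ih nidx (keyword ++ " " ++ w)) (Nat.le_succ _)

-- outer while loop over the filtered relation, with the 'not in keywords' dedup append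
def pvOuterA : List (Int × String) → List String → List String
  | [], keywords => keywords
  | (idx, kw) :: rest, keywords =>
    let r := pvInnerA idx kw rest
    pvOuterA r.2 (if keywords.contains r.1 then keywords else keywords ++ [r.1])
termination_by rel _ => rel.length
decreasing_by
  exact Nat.lt_succ_of_le (pvInnerA_len idx kw rest)

def multi_word_keyword (potential_keywords : List String) (filtered_tokens : List (Int × String)) : List String :=
  let relation := filtered_tokens.filter (fun t => potential_keywords.contains t.2)
  pvOuterA relation []

-- ===== PORT B =====
-- cuts = [0] + [p + 1 for p, (a, b) in enumerate(zip(relation, relation[1:])) if b[0] != a[0] + 1] + [len(relation)]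
def pvCuts (rel : List (Int × String)) : List Int :=
  0 :: ((PySem.List.enumerate (rel.zip rel.tail)).filter
      (fun pe => pe.2.2.1 != pe.2.1.1 + 1)).map (fun pe => pe.1 + 1) ++ [(rel.length : Int)]

-- phrases = [' '.join(w for _, w in relation[lo:hi]) for lo, hi in zip(cuts, cuts[1:])]
def pvPhrases (rel : List (Int × String)) : List String :=
  ((pvCuts rel).zip (pvCuts rel).tail).map (fun lh =>
    PySem.Str.join " " ((PySem.List.slice rel (some lh.1) (some lh.2)).map Prod.snd))

def multi_word_keyword_alt (potential_keywords : List String) (filtered_tokens : List (Int × String)) : List String :=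
  let kws := PySem.Set.ofList potential_keywords
  let relation := filtered_tokens.filter (fun t => PySem.Set.contains kws t.2)
  if relation.isEmpty then []
  else PySem.List.dedup (pvPhrases relation)

-- ===== PRECONDITION & SPEC =====
def Spec_multi_word_keyword (potential_keywords : List String) (filtered_tokens : List (Int × String)) (out : List String) : Prop := out = multi_word_keyword_alt potential_keywords filtered_tokens
instance (potential_keywords : List String) (filtered_tokens : List (Int × String)) (out : List String) : Decidable (Spec_multi_word_keyword potential_keywords filtered_tokens out) := by unfold Spec_multi_word_keyword; infer_instance

-- ===== CLAIM =====
def Claim_equal_multi_word_keyword : Prop := ∀ (potential_keywords : List String) (filtered_tokens : List (Int × String)), Dom_multi_word_keyword potential_keywords filtered_tokens → Spec_multi_word_keyword potential_keywords filtered_tokens (multi_word_keyword potential_keywords filtered_tokens)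

-- ===== LEMMAS AND PROOFS =====

-- the words of A's maximal adjacent run, and the remainder (pure view of pvInnerA)
def pvSpan (p : Int) : List (Int × String) → List (Int × String) × List (Int × String)
  | [] => ([], [])
  | (j, w) :: r =>
    if j ≠ p + 1 then ([], (j, w) :: r)
    else
      let s := pvSpan j r
      ((j, w) :: s.1, s.2)

def pvLast (p : Int) (c : List (Int × String)) : Int := c.foldl (fun _ t => t.1) p

def pvChain (p : Int) : List (Int × String) → Bool
  | [] => true
  | t :: r => (t.1 == p + 1) && pvChain t.1 r

-- A's list of run keywords, in order (before dedup)
def pvRuns : List (Int × String) → List String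
  | [] => []
  | (i, w) :: rest =>
    let r := pvInnerA i w rest
    r.1 :: pvRuns r.2
termination_by rel => rel.length
decreasing_by
  exact Nat.lt_succ_of_le (pvInnerA_len i w rest)

-- B's boundary positions, start parameterised (proof view of the enumerate/filter/map pass)
def pvB (ps : List ((Int × String) × (Int × String))) (s : Int) : List Int :=
  ((PySem.List.enumerate ps s).filter (fun pe => pe.2.2.1 != pe.2.1.1 + 1)).map (fun pe => pe.1 + 1)

theorem pvCuts_eq (rel : List (Int × String)) :
    pvCuts rel = 0 :: pvB (rel.zip rel.tail) 0 ++ [(rel.length : Int)] := rfl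

theorem pvOuterA_eq (rel : List (Int × String)) (ks : List String) :
    pvOuterA rel ks = (pvRuns rel).foldl PySem.Set.add ks := by
  induction rel using pvRuns.induct generalizing ks with
  | case1 => rw [pvOuterA, pvRuns]; rfl
  | case2 i w rest r ih =>
    rw [pvOuterA, pvRuns]
    simp only [List.foldl_cons]
    rw [ih]
    rfl

theorem pvInnerA_eq_span (rest : List (Int × String)) (p : Int) (kw : String) :
    pvInnerA p kw rest =
      (((pvSpan p rest).1.map Prod.snd).foldl (fun a b => a ++ " " ++ b) kw, (pvSpan p rest).2) := by
  induction rest generalizing p kw with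
  | nil => simp [pvInnerA, pvSpan]
  | cons h t ih =>
    obtain ⟨j, w⟩ := h
    by_cases hne : j ≠ p + 1
    · simp [pvInnerA, pvSpan, hne]
    · rw [pvInnerA, if_neg hne, pvSpan, if_neg hne]
      simp only [List.map_cons, List.foldl_cons]
      exact ih j (kw ++ " " ++ w)

theorem pv_cjoin_snoc (sep : List Char) (ps : List (List Char)) (q : List Char) (h : ps ≠ []) :
    PySem.Chars.join sep (ps ++ [q]) = PySem.Chars.join sep ps ++ sep ++ q := by
  induction ps with
  | nil => exact absurd rfl h
  | cons a t ih =>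
    cases t with
    | nil => simp [PySem.Chars.join_cons_cons, PySem.Chars.join_singleton]
    | cons b t' =>
      have ih' := ih (by simp)
      have e1 : (a :: b :: t') ++ [q] = a :: b :: (t' ++ [q]) := by simp
      have e2 : (b :: t') ++ [q] = b :: (t' ++ [q]) := by simp
      rw [e1, PySem.Chars.join_cons_cons, ← e2, ih', PySem.Chars.join_cons_cons]
      simp [List.append_assoc]

theorem pv_join_snoc (cur : List String) (w : String) (h : cur ≠ []) :
    PySem.Str.join " " (cur ++ [w]) = PySem.Str.join " " cur ++ " " ++ w := by
  simp only [PySem.Str.join, List.map_append, List.map_cons, List.map_nil]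
  rw [pv_cjoin_snoc _ _ _ (by simpa using h)]
  rw [String.ofList_append, String.ofList_append, String.ofList_toList, String.ofList_toList]

theorem pv_join_cons_foldl (ws : List String) (w : String) :
    PySem.Str.join " " (w :: ws) = ws.foldl (fun a b => a ++ " " ++ b) w := by
  induction ws using List.reverseRecOn with
  | nil =>
    simp [PySem.Str.join, PySem.Chars.join_singleton, String.ofList_toList]
  | append_singleton l x ih =>
    have : w :: (l ++ [x]) = (w :: l) ++ [x] := by simp
    rw [this, pv_join_snoc _ _ (by simp), ih, List.foldl_append]
    simp

theorem pvSpan_append (rest : List (Int × String)) (p : Int) :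
    rest = (pvSpan p rest).1 ++ (pvSpan p rest).2 := by
  induction rest generalizing p with
  | nil => simp [pvSpan]
  | cons h t ih =>
    obtain ⟨j, w⟩ := h
    by_cases hne : j ≠ p + 1
    · simp [pvSpan, hne]
    · rw [pvSpan, if_neg hne]
      simpa using ih j

theorem pvSpan_chain (rest : List (Int × String)) (p : Int) :
    pvChain p (pvSpan p rest).1 = true := by
  induction rest generalizing p with
  | nil => simp [pvSpan, pvChain]
  | cons h t ih =>
    obtain ⟨j, w⟩ := h
    by_cases hne : j ≠ p + 1
    · simp [pvSpan, hne, pvChain]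
    · rw [pvSpan, if_neg hne]
      simp only [ne_eq, not_not] at hne
      simp only [pvChain, Bool.and_eq_true, beq_iff_eq]
      exact ⟨hne, ih j⟩

theorem pvSpan_boundary (rest : List (Int × String)) (p : Int) (t : Int × String)
    (r2 : List (Int × String)) (h : (pvSpan p rest).2 = t :: r2) :
    t.1 ≠ pvLast p (pvSpan p rest).1 + 1 := by
  induction rest generalizing p with
  | nil => simp [pvSpan] at h
  | cons hd tl ih =>
    obtain ⟨j, w⟩ := hd
    by_cases hne : j ≠ p + 1
    · rw [pvSpan, if_pos hne] at h ⊢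
      cases h
      simpa [pvLast] using hne
    · rw [pvSpan, if_neg hne] at h ⊢
      simp only at h ⊢
      have := ih j (by simpa using h)
      simpa [pvLast] using this

theorem pvLast_getLast (c : List (Int × String)) (x : Int × String) :
    pvLast x.1 c = (c.getLast?.getD x).1 := by
  induction c generalizing x with
  | nil => simp [pvLast]
  | cons h t ih =>
    have := ih h
    cases t with
    | nil => simp [pvLast]
    | cons a b =>
      rw [List.getLast?_cons_cons]
      simp only [pvLast, List.foldl_cons] at this ⊢
      exact this

theorem pvB_cons (q : (Int × String) × (Int × String)) (ps : List ((Int × String) × (Int × String))) (s : Int) :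
    pvB (q :: ps) s = (if (q.2.1 != q.1.1 + 1) = true then [s + 1] else []) ++ pvB ps (s + 1) := by
  simp only [pvB, PySem.List.enumerate_cons, List.filter_cons]
  split <;> simp

theorem pvEnum_ge (ps : List ((Int × String) × (Int × String))) (s : Int)
    (pe : Int × ((Int × String) × (Int × String))) (h : pe ∈ PySem.List.enumerate ps s) : s ≤ pe.1 := by
  induction ps generalizing s with
  | nil => simp [PySem.List.enumerate_nil] at h
  | cons q t ih =>
    rw [PySem.List.enumerate_cons] at h
    rcases List.mem_cons.mp h with h1 | h2
    · subst h1; rfl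
    · have := ih (s + 1) h2
      omega

theorem pvB_append (l1 l2 : List ((Int × String) × (Int × String))) (s : Int) :
    pvB (l1 ++ l2) s = pvB l1 s ++ pvB l2 (s + l1.length) := by
  induction l1 generalizing s with
  | nil => simp [pvB, PySem.List.enumerate_nil]
  | cons q t ih =>
    rw [List.cons_append, pvB_cons, pvB_cons, ih (s + 1), List.append_assoc]
    have : s + 1 + (t.length : Int) = s + ((q :: t).length : Int) := by
      simp; omega
    rw [this]

theorem pvB_shift (ps : List ((Int × String) × (Int × String))) (s : Int) :
    pvB ps s = (pvB ps 0).map (· + s) := by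
  induction ps generalizing s with
  | nil => simp [pvB, PySem.List.enumerate_nil]
  | cons q t ih =>
    rw [pvB_cons, pvB_cons, ih (s + 1), ih (0 + 1)]
    rw [List.map_append, List.map_map]
    congr 1
    · split
      · simp only [List.map_cons, List.map_nil]
        congr 1
        omega
      · rfl
    · apply List.map_congr_left
      intro a _
      simp only [Function.comp_apply]
      omega

theorem pvB_chain (c : List (Int × String)) (x : Int × String) (s : Int)
    (h : pvChain x.1 c = true) : pvB ((x :: c).zip c) s = [] := by
  induction c generalizing x s with
  | nil => simp [pvB, PySem.List.enumerate_nil]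
  | cons y t ih =>
    rw [List.zip_cons_cons, pvB_cons]
    simp only [pvChain, Bool.and_eq_true, beq_iff_eq] at h
    obtain ⟨h1, h2⟩ := h
    rw [if_neg (by simp [h1]), List.nil_append]
    exact ih y (s + 1) h2

theorem pvB_nonneg (ps : List ((Int × String) × (Int × String))) (x : Int)
    (h : x ∈ pvB ps 0) : 0 ≤ x := by
  simp only [pvB, List.mem_map, List.mem_filter] at h
  obtain ⟨pe, ⟨hmem, _⟩, hx⟩ := h
  have := pvEnum_ge ps 0 pe hmem
  omega

theorem pvCuts_nonneg (rel : List (Int × String)) (x : Int) (h : x ∈ pvCuts rel) : 0 ≤ x := by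
  rw [pvCuts_eq] at h
  rcases List.mem_cons.mp h with h1 | h2
  · omega
  · rcases List.mem_append.mp h2 with h3 | h4
    · exact pvB_nonneg _ x h3
    · simp at h4; omega

theorem pvZipAppend (c : List (Int × String)) (x t : Int × String) (r2 : List (Int × String)) :
    ((x :: c) ++ t :: r2).zip (c ++ t :: r2)
      = (x :: c).zip c ++ [(c.getLast?.getD x, t)] ++ (t :: r2).zip r2 := by
  induction c generalizing x with
  | nil => simp
  | cons y t' ih =>
    have h2 := ih y
    rw [List.cons_append] at h2
    rw [List.cons_append, List.cons_append, List.zip_cons_cons, h2]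
    cases t' with
    | nil => simp
    | cons a b =>
      rw [List.getLast?_eq_some_getLast (l := a :: b) (by simp)]
      simp [List.getLast?_eq_some_getLast (l := a :: b) (by simp)]

theorem pvB_nil (s : Int) : pvB [] s = [] := rfl

theorem pvSliceShift (l1 l2 : List (Int × String)) (a b : Int) (ha : 0 ≤ a) (hb : 0 ≤ b) :
    PySem.List.slice (l1 ++ l2) (some (a + (l1.length : Int))) (some (b + (l1.length : Int)))
      = PySem.List.slice l2 (some a) (some b) := by
  rw [PySem.List.slice_toNat _ (by omega) (by omega), PySem.List.slice_toNat _ ha hb]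
  have h1 : (a + (l1.length : Int)).toNat = l1.length + a.toNat := by omega
  have h2 : (b + (l1.length : Int)).toNat - (a + (l1.length : Int)).toNat = b.toNat - a.toNat := by omega
  rw [h2, h1, ← List.drop_drop, List.drop_left]

theorem pvCuts_decomp (c r' : List (Int × String)) (x t : Int × String) (r2 : List (Int × String))
    (hr : r' = t :: r2) (hch : pvChain x.1 c = true)
    (hb : t.1 ≠ pvLast x.1 c + 1) :
    pvCuts ((x :: c) ++ r') = 0 :: (pvCuts r').map (· + ((c.length : Int) + 1)) := by
  subst hr
  rw [pvCuts_eq, pvCuts_eq]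
  have htail : ((x :: c) ++ t :: r2).tail = c ++ t :: r2 := rfl
  have htl : (t :: r2).tail = r2 := rfl
  rw [htail, htl, pvZipAppend, List.append_assoc, pvB_append, pvB_chain c x 0 hch,
    pvB_append, pvB_cons, pvB_nil]
  have hcond : (((c.getLast?.getD x, t)).2.1 != ((c.getLast?.getD x, t)).1.1 + 1) = true := by
    have hL := pvLast_getLast c x
    simp only [bne_iff_ne, ne_eq]
    intro hEq
    exact hb (by rw [hL]; exact hEq)
  rw [if_pos hcond]
  rw [pvB_shift ((t :: r2).zip r2) _]
  have hlen : ((x :: c).zip c).length = c.length := by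
    simp [List.length_zip]
  simp only [hlen, List.map_cons, List.map_append, List.nil_append,
    List.append_nil, List.cons_append, List.length_append, List.length_cons, List.map_nil]
  congr 2
  congr 1
  · apply List.map_congr_left
    intro a _
    simp only [List.length_nil]
    push_cast
    omega
  · simp only [List.cons.injEq, and_true]
    push_cast
    omega

theorem pvZipShape (u : List Int) (f : Int → Int) (hu : ∃ w, u = 0 :: w) :
    (((0 : Int) :: u.map f).zip (u.map f))
      = (0, f 0) :: ((u.zip u.tail).map (Prod.map f f)) := by
  obtain ⟨w, rfl⟩ := hu
  rw [List.tail_cons, ← List.zip_map]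
  simp [List.zip_cons_cons]

theorem pvPhrases_decomp (c r' : List (Int × String)) (x t : Int × String) (r2 : List (Int × String))
    (hr : r' = t :: r2) (hch : pvChain x.1 c = true)
    (hb : t.1 ≠ pvLast x.1 c + 1) :
    pvPhrases ((x :: c) ++ r')
      = PySem.Str.join " " ((x :: c).map Prod.snd) :: pvPhrases r' := by
  have hc := pvCuts_decomp c r' x t r2 hr hch hb
  unfold pvPhrases
  rw [hc, List.tail_cons,
    pvZipShape (pvCuts r') _
      ⟨pvB (r'.zip r'.tail) 0 ++ [(r'.length : Int)], by rw [pvCuts_eq, List.cons_append]⟩,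
    List.map_cons]
  congr 1
  · have hsl : PySem.List.slice ((x :: c) ++ r') (some 0) (some (0 + ((c.length : Int) + 1)))
        = x :: c := by
      rw [PySem.List.slice_toNat _ (by omega) (by omega)]
      have h0 : ((0 : Int) + ((c.length : Int) + 1)).toNat - (0 : Int).toNat = (x :: c).length := by
        simp
      rw [h0]
      simp
    simp only [hsl]
  · rw [List.map_map]
    apply List.map_congr_left
    intro q hq
    obtain ⟨a, b⟩ := q
    have hmem := List.of_mem_zip hq
    have ha : 0 ≤ a := pvCuts_nonneg r' a hmem.1
    have hbn : 0 ≤ b := pvCuts_nonneg r' b (List.mem_of_mem_tail hmem.2)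
    simp only [Function.comp_apply, Prod.map_apply]
    have hca : a + ((c.length : Int) + 1) = a + (((x :: c).length : Int)) := by push_cast [List.length_cons]; omega
    have hcb : b + ((c.length : Int) + 1) = b + (((x :: c).length : Int)) := by push_cast [List.length_cons]; omega
    rw [hca, hcb, pvSliceShift (x :: c) r' a b ha hbn]

theorem pvPhrases_all (rel : List (Int × String)) (x : Int × String) (c : List (Int × String))
    (hrel : rel = x :: c) (hch : pvChain x.1 c = true) :
    pvPhrases rel = [PySem.Str.join " " (rel.map Prod.snd)] := by
  subst hrel
  unfold pvPhrases
  rw [pvCuts_eq]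
  rw [show (x :: c).tail = c from rfl, pvB_chain c x 0 hch]
  simp only [List.cons_append, List.nil_append, List.tail_cons, List.zip_cons_cons,
    List.zip_nil_right, List.map_cons, List.map_nil]
  have hsl : PySem.List.slice (x :: c) (some 0) (some (((x :: c).length : Int))) = x :: c := by
    rw [PySem.List.slice_toNat _ (by omega) (by omega)]
    simp
  rw [hsl]
  simp

theorem pvMain (rel : List (Int × String)) (h : rel ≠ []) : pvPhrases rel = pvRuns rel := by
  induction rel using pvRuns.induct with
  | case1 => exact absurd rfl h
  | case2 i w rest r ih =>
    have hspan := pvInnerA_eq_span rest i w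
    have hrest := pvSpan_append rest i
    have hch : pvChain (i, w).1 (pvSpan i rest).1 = true := pvSpan_chain rest i
    rw [pvRuns]
    cases hs2 : (pvSpan i rest).2 with
    | nil =>
      have hrel : (i, w) :: rest = (i, w) :: (pvSpan i rest).1 := by
        conv_lhs => rw [hrest, hs2]
        simp
      rw [pvPhrases_all ((i, w) :: rest) (i, w) (pvSpan i rest).1 hrel hch]
      rw [hspan, hs2]
      simp only [pvRuns]
      rw [← pv_join_cons_foldl]
      congr 1
      conv_lhs => rw [hrel]
      simp
    | cons t r2 =>
      have hb := pvSpan_boundary rest i t r2 hs2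
      have hrel2 : (i, w) :: rest = ((i, w) :: (pvSpan i rest).1) ++ (pvSpan i rest).2 := by
        conv_lhs => rw [hrest]
        rfl
      rw [hrel2, pvPhrases_decomp (pvSpan i rest).1 (pvSpan i rest).2 (i, w) t r2 hs2 hch hb]
      congr 1
      · rw [hspan]
        simp only [List.map_cons]
        rw [pv_join_cons_foldl]
      · have h2 : (pvInnerA i w rest).2 = (pvSpan i rest).2 := by rw [hspan]
        rw [← h2]
        exact ih (by rw [h2, hs2]; exact List.cons_ne_nil t r2)

-- ===== VERDICT =====
theorem multi_word_keyword_spec : Claim_equal_multi_word_keyword := by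
  intro pk ft _
  unfold Spec_multi_word_keyword multi_word_keyword multi_word_keyword_alt
  dsimp only
  have hfil : ft.filter (fun t : Int × String => PySem.Set.contains (PySem.Set.ofList pk) t.2)
      = ft.filter (fun t => pk.contains t.2) := by
    apply List.filter_congr
    intro t _
    have hmm : t.2 ∈ PySem.Set.ofList pk ↔ t.2 ∈ pk := PySem.Set.mem_ofList pk t.2
    by_cases hm : t.2 ∈ pk
    · simp [PySem.Set.contains, hm, hmm.mpr hm]
    · have : ¬ t.2 ∈ PySem.Set.ofList pk := fun hx => hm (hmm.mp hx)
      simp [PySem.Set.contains, hm, this]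
  rw [hfil]
  set rel := ft.filter (fun t => pk.contains t.2) with hrel
  by_cases he : rel.isEmpty
  · rw [if_pos he]
    rw [List.isEmpty_iff.mp he, pvOuterA]
  · rw [if_neg he]
    rw [pvOuterA_eq, pvMain rel (by simpa [List.isEmpty_iff] using he)]
    rfl
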